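-- pv_equiv track=rewrite | github.com/minkaas/AdventOfCode_2 | 2023/Day15/Day15.py | part1
-- ===== SOURCE A (Python) =====
-- def mult_and_mod(current_value):
--     return current_value * 17 % 256
--
-- def part1(data):
--     result = 0
--     for dat in data:
--         current_value = 0
--         for char in dat:
--             current_value += ord(char)
--             current_value = mult_and_mod(current_value)
--         result += current_value
--     return result
-- ===== SOURCE B (Python) =====
-- def part1(data):
--     total = 0
--     for dat in data:
--         acc = 0
--         p = 17
--         for char in reversed(dat):
--             acc += ord(char) * p
--             p = p * 17 % 256
--         total += acc % 256
--     return total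
-- ===== Notes on version B (the rewrite author's own statement) =====
-- stated objective: alternative
-- what changed: Replaces the Horner-style per-character update ((v+ord(c))*17 % 256) with a weighted-sum formulation: scan each string from the last character to the first keeping a running power of 17 mod 256, sum ord(c)*power, and take the per-string sum mod 256 once at the end.
import Mathlib
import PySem

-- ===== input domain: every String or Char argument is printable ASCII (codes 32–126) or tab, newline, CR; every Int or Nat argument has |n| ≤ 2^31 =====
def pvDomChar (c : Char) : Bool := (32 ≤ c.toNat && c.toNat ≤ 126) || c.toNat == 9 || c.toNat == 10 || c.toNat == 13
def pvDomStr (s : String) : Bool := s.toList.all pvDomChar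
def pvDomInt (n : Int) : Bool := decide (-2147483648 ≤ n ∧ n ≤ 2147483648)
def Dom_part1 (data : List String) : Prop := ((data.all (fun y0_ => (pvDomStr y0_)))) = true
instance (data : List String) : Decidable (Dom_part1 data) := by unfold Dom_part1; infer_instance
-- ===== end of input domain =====

-- B replaces A's Horner-style per-character update with a right-to-left weighted sum
-- (ord(c) times a running power of 17 mod 256), reduced mod 256 once per string; alternative decomposition, same cost.

-- ===== PORT A =====
def mult_and_mod (current_value : Int) : Int := PySem.Int.mod (current_value * 17) 256

def part1 (data : List String) : Int :=
  data.foldl (fun result dat =>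
    result + dat.toList.foldl (fun current_value ch =>
      mult_and_mod (current_value + (ch.toNat : Int))) 0) 0

-- ===== PORT B =====
-- per-string: scan reversed(dat) keeping (acc, p); acc += ord(c)*p; p = p*17 % 256; return acc % 256
def hashB (dat : String) : Int :=
  let st := dat.toList.reverse.foldl (fun (st : Int × Int) ch =>
    (st.1 + (ch.toNat : Int) * st.2, PySem.Int.mod (st.2 * 17) 256)) (0, 17)
  PySem.Int.mod st.1 256

def part1_alt (data : List String) : Int :=
  data.foldl (fun total dat => total + hashB dat) 0

-- ===== PRECONDITION & SPEC =====
def Spec_part1 (data : List String) (out : Int) : Prop := out = part1_alt data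
instance (data : List String) (out : Int) : Decidable (Spec_part1 data out) := by unfold Spec_part1; infer_instance

-- ===== CLAIM (what is proved, stated in full; the proofs are below) =====
def Claim_equal_part1 : Prop := ∀ (data : List String), Dom_part1 data → Spec_part1 data (part1 data)

-- ===== LEMMAS AND PROOFS =====

-- A's per-character step and B's foldr-form step, named for the proofs
def gA (cv : Int) (ch : Char) : Int := mult_and_mod (cv + (ch.toNat : Int))
def fB (ch : Char) (st : Int × Int) : Int × Int :=
  (st.1 + (ch.toNat : Int) * st.2, PySem.Int.mod (st.2 * 17) 256)

theorem pvMod256 (x : Int) : PySem.Int.mod x 256 = x % 256 :=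
  PySem.Int.mod_eq_emod_of_pos (by norm_num)

theorem hashB_eq_foldr (dat : String) :
    hashB dat = PySem.Int.mod (dat.toList.foldr fB (0, 17)).1 256 := by
  simp only [hashB, List.foldl_reverse]; rfl

theorem snd_spec (l : List Char) :
    (l.foldr fB (0, 17)).2 = 17 ^ (l.length + 1) % 256 := by
  induction l with
  | nil => decide
  | cons c l ih =>
    simp only [List.foldr_cons, fB, pvMod256, ih, List.length_cons]
    rw [Int.mul_emod, Int.emod_emod_of_dvd _ dvd_rfl, ← Int.mul_emod, ← pow_succ]

theorem horner (l : List Char) : ∀ (v : Int),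
    (l.foldl gA v) % 256 = (v * 17 ^ l.length + (l.foldr fB (0, 17)).1) % 256 := by
  induction l with
  | nil => intro v; simp
  | cons c l ih =>
    intro v
    have hg : gA v c = (v + (c.toNat : Int)) * 17 % 256 := by
      simp [gA, mult_and_mod]
    simp only [List.foldl_cons, List.foldr_cons, fB, snd_spec, List.length_cons]
    rw [ih, hg]
    set k := l.length
    set acc := (l.foldr fB (0, 17)).1
    set cc := (c.toNat : Int)
    have h1 : (v + cc) * 17 % 256 * 17 ^ k + acc ≡ (v + cc) * 17 * 17 ^ k + acc [ZMOD 256] :=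
      Int.ModEq.add_right _ (Int.ModEq.mul_right _ (Int.emod_emod_of_dvd _ dvd_rfl))
    have h2 : v * 17 ^ (k + 1) + (acc + cc * (17 ^ (k + 1) % 256)) ≡
        v * 17 ^ (k + 1) + (acc + cc * 17 ^ (k + 1)) [ZMOD 256] :=
      Int.ModEq.add_left _ (Int.ModEq.add_left _
        (Int.ModEq.mul_left _ (Int.emod_emod_of_dvd _ dvd_rfl)))
    have e : (v + cc) * 17 * 17 ^ k + acc = v * 17 ^ (k + 1) + (acc + cc * 17 ^ (k + 1)) := by
      rw [pow_succ]; ring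
    exact h1.trans (by rw [e]; exact h2.symm)

theorem idemA (l : List Char) : ∀ (v : Int), l ≠ [] →
    (l.foldl gA v) % 256 = l.foldl gA v := by
  induction l with
  | nil => intro v h; exact absurd rfl h
  | cons c l ih =>
    intro v _
    by_cases hl : l = []
    · subst hl
      simp [gA, mult_and_mod, Int.emod_emod_of_dvd _ (dvd_refl (256 : Int))]
    · simpa using ih (gA v c) hl

theorem perstring (dat : String) : dat.toList.foldl gA 0 = hashB dat := by
  rw [hashB_eq_foldr, pvMod256]
  cases h : dat.toList with
  | nil => simp
  | cons c l =>
    rw [← h]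
    have hne : dat.toList ≠ [] := by rw [h]; exact List.cons_ne_nil _ _
    rw [← idemA dat.toList 0 hne, horner dat.toList 0]
    simp

-- ===== VERDICT (by name: the statement is the Claim_ definition above) =====
theorem part1_spec : Claim_equal_part1 := by
  intro data _
  show part1 data = part1_alt data
  have key : ∀ (ds : List String) (r : Int),
      ds.foldl (fun result dat => result + dat.toList.foldl (fun cv ch =>
        mult_and_mod (cv + (ch.toNat : Int))) 0) r
      = ds.foldl (fun total dat => total + hashB dat) r := by
    intro ds
    induction ds with
    | nil => intro r; rfl
    | cons d ds ih =>
      intro r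
      simp only [List.foldl_cons]
      rw [ih]
      congr 1
      show r + d.toList.foldl gA 0 = r + hashB d
      rw [perstring]
  exact key data 0
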